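-- pv_equiv track=rewrite | github.com/Gagan-nmims/InfyTQ-Answers | Assignment on List Level1.py | find_leap_years
-- ===== SOURCE A (Python) =====
-- def find_leap_years(given_year):
--
--     # Write your logic here
--     count = 0
--     list_of_leap_years = []
--
--     while (count < 15):
--         if (given_year % 4 == 0 and given_year % 100!= 0 or given_year % 400 == 0):
--             list_of_leap_years.append(given_year)
--             count = count + 1
--         given_year = given_year + 1
--
--     return list_of_leap_years
-- ===== SOURCE B (Python) =====
-- def find_leap_years(given_year):
--     # Generate the by-4 candidates of a fixed window starting at the first
--     # multiple of four at or after given_year (the window always contains at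
--     # least fifteen leap years: at most one skipped century fits in it),
--     # filter with the century rule, and slice off the first fifteen.
--     q = given_year + (-given_year) % 4
--     return [y for y in range(q, q + 68, 4) if y % 100 != 0 or y % 400 == 0][:15]
-- ===== Notes on version B (the rewrite author's own statement) =====
-- stated objective: alternative
-- what changed: B replaces A's year-by-year while-loop with counter and full leap predicate by a generate-filter-slice pipeline: it builds the by-4 candidates of a fixed window after the given year (which provably always holds at least fifteen leap years, since at most one skipped century fits in it), filters them with the century rule only, and takes the first fifteen.
import Mathlib
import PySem

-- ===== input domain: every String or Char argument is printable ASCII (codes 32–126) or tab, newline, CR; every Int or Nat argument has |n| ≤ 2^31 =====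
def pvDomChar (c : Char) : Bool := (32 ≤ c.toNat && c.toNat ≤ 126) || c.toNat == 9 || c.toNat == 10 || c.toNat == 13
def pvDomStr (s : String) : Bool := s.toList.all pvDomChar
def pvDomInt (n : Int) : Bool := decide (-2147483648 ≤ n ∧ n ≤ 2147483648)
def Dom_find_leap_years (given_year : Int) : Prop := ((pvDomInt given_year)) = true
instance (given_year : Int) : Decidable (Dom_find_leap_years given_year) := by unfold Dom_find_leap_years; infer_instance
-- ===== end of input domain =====

-- B replaces A's year-by-year scan (counter + full leap predicate) by a
-- generate-filter-slice pipeline over the by-4 candidates of a fixed window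
-- after the given year; alternative decomposition, same O(1) cost.
-- Python '%' here always has positive divisors (4, 100, 400), where Int.emod agrees with Python.
-- A's while loop is ported with a fuel parameter used ONLY as a totality guard:
-- the entry point supplies fuel strictly above the loop's proven iteration bound
-- (pvGap_le below), so the fuel-exhausted branch is never taken.

-- ===== PORT A =====
-- A's while loop, step for step (count, the scanned year, the accumulator list)
def pvALoop (fuel : Nat) (count : Int) (given_year : Int) (list_of_leap_years : List Int) : List Int :=
  match fuel with
  | 0 => list_of_leap_years  -- unreachable: entry fuel exceeds the iteration bound
  | fuel + 1 =>
    if count < 15 then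
      if (given_year % 4 = 0 ∧ given_year % 100 ≠ 0) ∨ given_year % 400 = 0 then
        pvALoop fuel (count + 1) (given_year + 1) (list_of_leap_years ++ [given_year])
      else
        pvALoop fuel count (given_year + 1) list_of_leap_years
    else list_of_leap_years

def find_leap_years (given_year : Int) : List Int :=
  pvALoop 136 0 given_year []

-- ===== PORT B =====
-- the comprehension with its if-clause is filter over the range; the final
-- slice with a non-negative literal bound is List.take
def find_leap_years_alt (given_year : Int) : List Int :=
  let q := given_year + (-given_year) % 4
  ((PySem.List.pyRange q (q + 68) 4).filter
      (fun y => decide (y % 100 ≠ 0) || decide (y % 400 = 0))).take 15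

-- ===== PRECONDITION & SPEC =====
def Spec_find_leap_years (given_year : Int) (out : List Int) : Prop := out = find_leap_years_alt given_year
instance (given_year : Int) (out : List Int) : Decidable (Spec_find_leap_years given_year out) := by unfold Spec_find_leap_years; infer_instance

-- ===== CLAIM (what is proved, stated in full; the proofs are below) =====
def Claim_equal_find_leap_years : Prop := ∀ (given_year : Int), Dom_find_leap_years given_year → Spec_find_leap_years given_year (find_leap_years given_year)

-- ===== LEMMAS AND PROOFS =====

-- B's filter predicate, named for the lemmas (definitionally the lambda in the port)
def pvLeap4 (y : Int) : Bool := decide (y % 100 ≠ 0) || decide (y % 400 = 0)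

-- the by-4 candidate list: q, q+4, …, q+4(n-1)
def pvCand (q : Int) (n : Nat) : List Int := List.map (fun (k : Nat) => q + 4 * (k : Int)) (List.range n)

-- proof-only intermediate: A's scan compressed to a by-4 walk (bridges A to B)
def pvBLoop (fuel : Nat) (q : Int) (res : List Int) : List Int :=
  match fuel with
  | 0 => res
  | fuel + 1 =>
    if res.length < 15 then
      if q % 100 ≠ 0 ∨ q % 400 = 0 then pvBLoop fuel (q + 4) (res ++ [q])
      else pvBLoop fuel (q + 4) res
    else res

-- distance from y to the next leap year; drives the iteration-count bound of A's loop
def pvGap (y : Int) : Nat :=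
  ((-y) % 4 + (if (y + (-y) % 4) % 100 = 0 ∧ (y + (-y) % 4) % 400 ≠ 0 then 4 else 0)).toNat

theorem pvGap_le (y : Int) : pvGap y ≤ 7 := by
  unfold pvGap; split_ifs <;> omega

theorem pvGap_succ (y : Int)
    (h : ¬ ((y % 4 = 0 ∧ y % 100 ≠ 0) ∨ y % 400 = 0)) : pvGap (y+1) < pvGap y := by
  unfold pvGap; split_ifs <;> omega

theorem pvGap_zero (y : Int)
    (h : (y % 4 = 0 ∧ y % 100 ≠ 0) ∨ y % 400 = 0) : pvGap y = 0 := by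
  unfold pvGap; split_ifs <;> omega

-- simulation: A's year-by-year scan equals the by-4 walk started at the
-- first multiple of 4 at or after y
theorem pvALoop_eq_pvBLoop : ∀ (fuel : Nat) (count y : Int) (acc : List Int) (fuel2 : Nat),
    count = (acc.length : Int) →
    (15 - count).toNat * 8 + pvGap y < fuel →
    (15 - acc.length) * 2
      + (if (y + (-y) % 4) % 100 = 0 ∧ (y + (-y) % 4) % 400 ≠ 0 then 1 else 0) < fuel2 →
    pvALoop fuel count y acc = pvBLoop fuel2 (y + (-y) % 4) acc := by
  intro fuel
  induction fuel with
  | zero => intro count y acc fuel2 _ hA _; omega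
  | succ fuel ih =>
    intro count y acc fuel2 hlen hA hB
    obtain ⟨f2, rfl⟩ : ∃ f2, fuel2 = f2 + 1 := ⟨fuel2 - 1, by omega⟩
    by_cases h15 : count < 15
    · by_cases hl : (y % 4 = 0 ∧ y % 100 ≠ 0) ∨ y % 400 = 0
      · have h4 : y % 4 = 0 := by omega
        have hq : y + (-y) % 4 = y := by omega
        have hlt : acc.length < 15 := by omega
        have hc : y % 100 ≠ 0 ∨ y % 400 = 0 := by omega
        rw [pvALoop, if_pos h15, if_pos hl, hq, pvBLoop, if_pos hlt, if_pos hc]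
        have hq' : (y + 1) + (-(y + 1)) % 4 = y + 4 := by omega
        have hgz : pvGap y = 0 := pvGap_zero y hl
        have hg7 : pvGap (y + 1) ≤ 7 := pvGap_le (y + 1)
        have hstep := ih (count + 1) (y + 1) (acc ++ [y]) f2
          (by simp; omega) (by omega)
        rw [hq'] at hstep
        refine (hstep ?_).trans rfl
        simp only [List.length_append, List.length_cons, List.length_nil]
        revert hB; split_ifs <;> omega
      · by_cases h4 : y % 4 = 0
        · have hq : y + (-y) % 4 = y := by omega
          have hc : ¬ (y % 100 ≠ 0 ∨ y % 400 = 0) := by omega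
          have hlt : acc.length < 15 := by omega
          rw [pvALoop, if_pos h15, if_neg hl, hq, pvBLoop, if_pos hlt, if_neg hc]
          have hq' : (y + 1) + (-(y + 1)) % 4 = y + 4 := by omega
          have hgs := pvGap_succ y hl
          have hstep := ih count (y + 1) acc f2 hlen (by omega)
          rw [hq'] at hstep
          refine (hstep ?_).trans rfl
          revert hB; split_ifs <;> omega
        · have hq : y + (-y) % 4 = (y + 1) + (-(y + 1)) % 4 := by omega
          rw [pvALoop, if_pos h15, if_neg hl, hq]
          have hgs := pvGap_succ y hl
          exact ih count (y + 1) acc (f2 + 1) hlen (by omega) (by rw [← hq]; exact hB)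
    · rw [pvALoop, if_neg h15, pvBLoop, if_neg (by omega : ¬ acc.length < 15)]

theorem pvCand_succ (q : Int) (n : Nat) : pvCand q (n + 1) = q :: pvCand (q + 4) n := by
  unfold pvCand
  rw [List.range_succ_eq_map, List.map_cons, List.map_map]
  refine congrArg₂ _ (by norm_num) (List.map_congr_left ?_)
  intro k _
  simp only [Function.comp_apply]
  push_cast; ring

-- within a by-4 window staying strictly below the next century, every candidate passes
theorem pvAllPass : ∀ (n : Nat) (q r : Int), q % 100 = r → 0 < r → r + 4 * n ≤ 100 →
    (pvCand q n).filter pvLeap4 = pvCand q n := by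
  intro n
  induction n with
  | zero => intro q r _ _ _; simp [pvCand]
  | succ m ih =>
    intro q r hqr hr hle
    have hL : pvLeap4 q = true := by
      unfold pvLeap4; simp; omega
    rw [pvCand_succ, List.filter_cons, if_pos hL]
    cases m with
    | zero => simp [pvCand]
    | succ k =>
      rw [ih (q + 4) (r + 4) (by push_cast at hle ⊢; omega) (by omega)
          (by push_cast at hle ⊢; omega)]

-- at most one of n ≤ 24 consecutive by-4 candidates is a skipped century
theorem pvCount : ∀ (n : Nat) (q : Int), 4 * n ≤ 96 →
    (n : Int) ≤ ((pvCand q n).filter pvLeap4).length + 1 := by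
  intro n
  induction n with
  | zero => intro q _; simp
  | succ m ih =>
    intro q hle
    rw [pvCand_succ, List.filter_cons]
    by_cases hL : pvLeap4 q = true
    · rw [if_pos hL]
      have h2 := ih (q + 4) (by omega)
      simp only [List.length_cons]
      omega
    · rw [if_neg hL]
      have hq : q % 100 = 0 ∧ q % 400 ≠ 0 := by
        unfold pvLeap4 at hL; simp at hL; omega
      rw [pvAllPass m (q + 4) 4 (by omega) (by norm_num) (by omega)]
      simp only [pvCand, List.length_map, List.length_range]
      omega

-- the by-4 walk is exactly "filter then take" over the candidate list
theorem pvBLoop_eq_take : ∀ (n : Nat) (fuel : Nat) (q : Int) (acc : List Int),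
    acc.length ≤ 15 →
    15 ≤ acc.length + ((pvCand q n).filter pvLeap4).length →
    n < fuel →
    pvBLoop fuel q acc = acc ++ ((pvCand q n).filter pvLeap4).take (15 - acc.length) := by
  intro n
  induction n with
  | zero =>
    intro fuel q acc hle h15 hf
    obtain ⟨f, rfl⟩ : ∃ f, fuel = f + 1 := ⟨fuel - 1, by omega⟩
    have : acc.length = 15 := by simp [pvCand] at h15; omega
    rw [pvBLoop, if_neg (by omega)]
    simp [pvCand, this]
  | succ m ih =>
    intro fuel q acc hle h15 hf
    obtain ⟨f, rfl⟩ : ∃ f, fuel = f + 1 := ⟨fuel - 1, by omega⟩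
    rw [pvCand_succ, List.filter_cons] at h15 ⊢
    by_cases hacc : acc.length < 15
    · rw [pvBLoop, if_pos hacc]
      by_cases hL : pvLeap4 q = true
      · have hc : q % 100 ≠ 0 ∨ q % 400 = 0 := by
          unfold pvLeap4 at hL; simp at hL; omega
        rw [if_pos hc, if_pos hL] at *
        rw [ih f (q + 4) (acc ++ [q]) (by simp; omega)
              (by simp at h15 ⊢; omega) (by omega)]
        have hset : 15 - acc.length = (15 - (acc ++ [q]).length) + 1 := by
          simp; omega
        rw [hset, List.take_succ_cons]
        simp
      · have hc : ¬ (q % 100 ≠ 0 ∨ q % 400 = 0) := by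
          unfold pvLeap4 at hL; simp at hL; omega
        rw [if_neg hc, if_neg hL] at *
        exact ih f (q + 4) acc hle h15 (by omega)
    · rw [pvBLoop, if_neg hacc]
      have : 15 - acc.length = 0 := by omega
      simp [this]

-- range(q, q+68, 4) is the 17-element candidate list
theorem pvRange_eq_cand (q : Int) : PySem.List.pyRange q (q + 68) 4 = pvCand q 17 := by
  rw [PySem.List.pyRange_of_pos _ _ (by norm_num)]
  rw [if_pos (show q < q + 68 by omega)]
  rw [show ((q + 68 - q + 4 - 1) / 4 : Int).toNat = 17 by omega]
  rfl

-- ===== VERDICT (by name: the statement is the Claim_ definition above) =====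
theorem find_leap_years_spec : Claim_equal_find_leap_years := by
  intro given_year _
  unfold Spec_find_leap_years find_leap_years find_leap_years_alt
  have hcount := pvCount 17 (given_year + (-given_year) % 4) (by norm_num)
  rw [pvALoop_eq_pvBLoop 136 0 given_year [] 32 (by simp)
        (by have := pvGap_le given_year; omega)
        (by split_ifs <;> simp)]
  rw [pvBLoop_eq_take 17 32 (given_year + (-given_year) % 4) [] (by simp)
        (by simp; omega) (by norm_num)]
  rw [show (fun y : Int => decide (y % 100 ≠ 0) || decide (y % 400 = 0)) = pvLeap4 from rfl]
  simp only [pvRange_eq_cand]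
  simp
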